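-- pv_equiv track=rewrite | github.com/Joszi2006/Pillinfo | backend/services/drug_lookup_service.py | refine_products
-- ===== SOURCE A (Python) =====
-- from typing import List, Tuple, Optional, Dict
--
-- def refine_products(
--
--     products: List[Dict],
--     dosage: Optional[str] = None,
--     route: Optional[str] = None,
--     form: Optional[str] = None
-- ) -> List[Dict]:
--     """
--     Filter products based on dosage, route, and form.
--
--     Args:
--         products: List of product dictionaries
--         dosage: Dosage string (e.g., "200mg")
--         route: Administration route (e.g., "oral")
--         form: Drug form (e.g., "tablet")
--
--     Returns:
--         Filtered list of products (empty if no matches)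
--     """
--     if not products or not (dosage or route or form):
--         return products
--
--     # Build search terms
--     search_terms = []
--     if dosage:
--         search_terms.append(dosage.lower().strip())
--     if route:
--         search_terms.append(route.lower().strip())
--     if form:
--         search_terms.append(form.lower().strip())
--
--     # Extract and lowercase product names once
--     product_names = []
--     for p in products:
--         if isinstance(p, dict):
--             product_names.append(p.get("name", "").lower())
--         else:
--             product_names.append(str(p).lower())
--
--     # Exact matches (all terms present)
--     exact_matches = [
--         products[i] for i, p_lower in enumerate(product_names)
--         if all(term in p_lower for term in search_terms)
--     ]
--
--     if exact_matches:
--         return exact_matches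
--
--     # Partial matches (at least one term)
--     partial_matches = [
--         products[i] for i, p_lower in enumerate(product_names)
--         if any(term in p_lower for term in search_terms)
--     ]
--
--     return partial_matches if partial_matches else []
-- ===== SOURCE B (Python) =====
-- def refine_products(products, dosage=None, route=None, form=None):
--     """Classify-then-select: score every product with a match level
--     (2 = all terms, 1 = some term, 0 = none), take the maximum level,
--     and return the products at that level (or [] when the best is 0).
--     There is no exact/partial fallback structure at all."""
--     if not products or not (dosage or route or form):
--         return products
--
--     terms = [t.lower().strip() for t in (dosage, route, form) if t]
--
--     def level(p):
--         name = (p.get("name", "") if isinstance(p, dict) else str(p)).lower()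
--         if all(t in name for t in terms):
--             return 2
--         if any(t in name for t in terms):
--             return 1
--         return 0
--
--     levels = [level(p) for p in products]
--     best = max(levels)
--     if best == 0:
--         return []
--     return [p for p, l in zip(products, levels) if l == best]
-- ===== Notes on version B (the rewrite author's own statement) =====
-- stated objective: alternative
-- what changed: Replaces A's exact-list/fallback-to-partial-list structure by a classify-then-select algorithm: each product is scored with a match level (2=all terms, 1=some, 0=none), the maximum level is computed, and the products at that level are selected (or [] if the best level is 0) -- no exact/partial candidate lists or fallback branch exist.
import Mathlib
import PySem

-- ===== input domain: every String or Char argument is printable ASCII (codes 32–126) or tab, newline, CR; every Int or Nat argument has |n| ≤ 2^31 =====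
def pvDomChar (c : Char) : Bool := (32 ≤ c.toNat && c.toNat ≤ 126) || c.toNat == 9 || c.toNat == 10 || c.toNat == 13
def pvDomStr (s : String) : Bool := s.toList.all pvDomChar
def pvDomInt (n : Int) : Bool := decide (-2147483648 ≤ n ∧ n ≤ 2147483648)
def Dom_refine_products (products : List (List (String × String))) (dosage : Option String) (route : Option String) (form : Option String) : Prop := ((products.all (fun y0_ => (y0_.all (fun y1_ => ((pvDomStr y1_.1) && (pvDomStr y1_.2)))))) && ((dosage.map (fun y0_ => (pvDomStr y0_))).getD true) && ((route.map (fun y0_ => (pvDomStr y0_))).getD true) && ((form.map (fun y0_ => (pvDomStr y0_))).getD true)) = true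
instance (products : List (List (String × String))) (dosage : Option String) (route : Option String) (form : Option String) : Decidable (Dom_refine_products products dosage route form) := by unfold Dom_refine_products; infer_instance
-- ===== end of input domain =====

-- ===== PORT A =====
-- B replaces A's exact/partial fallback lists with a classify-then-select algorithm
-- (score each product with a match level 2/1/0, take the max level, select that level);
-- objective: alternative (same cost).

-- Python truthiness of an Optional[str]
def pvTruthy (o : Option String) : Bool :=
  match o with
  | some s => s != ""
  | none => false

def refine_products (products : List (List (String × String))) (dosage : Option String) (route : Option String) (form : Option String) : List (List (String × String)) :=
  if products = [] ∨ ¬(pvTruthy dosage ∨ pvTruthy route ∨ pvTruthy form) then products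
  else
    let search_terms : List String :=
      (if pvTruthy dosage then [PySem.Str.strip (PySem.Str.lower (dosage.getD ""))] else []) ++
      (if pvTruthy route then [PySem.Str.strip (PySem.Str.lower (route.getD ""))] else []) ++
      (if pvTruthy form then [PySem.Str.strip (PySem.Str.lower (form.getD ""))] else [])
    -- every element is a dict under the type convention, so the isinstance branch is always taken
    let product_names : List String :=
      products.map (fun p => PySem.Str.lower (PySem.Dict.getD (PySem.Dict.mk p) "name" ""))
    -- '[products[i] for i, p_lower in enumerate(product_names) if …]': products zipped with its name list
    let exact_matches : List (List (String × String)) :=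
      (products.zip product_names).filterMap
        (fun pp => if search_terms.all (fun t => PySem.Str.isIn t pp.2) then some pp.1 else none)
    if exact_matches ≠ [] then exact_matches
    else
      let partial_matches : List (List (String × String)) :=
        (products.zip product_names).filterMap
          (fun pp => if search_terms.any (fun t => PySem.Str.isIn t pp.2) then some pp.1 else none)
      if partial_matches ≠ [] then partial_matches else []

-- ===== PORT B =====
-- 'def level(p)' from Source B: 2 if all terms in the lowercased name, 1 if any, else 0
def pvLevel (terms : List String) (p : List (String × String)) : Nat :=
  let name := PySem.Str.lower (PySem.Dict.getD (PySem.Dict.mk p) "name" "")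
  if terms.all (fun t => PySem.Str.isIn t name) then 2
  else if terms.any (fun t => PySem.Str.isIn t name) then 1
  else 0

def refine_products_alt (products : List (List (String × String))) (dosage : Option String) (route : Option String) (form : Option String) : List (List (String × String)) :=
  if products = [] ∨ ¬(pvTruthy dosage ∨ pvTruthy route ∨ pvTruthy form) then products
  else
    -- '[t.lower().strip() for t in (dosage, route, form) if t]'
    let terms : List String :=
      [dosage, route, form].filterMap
        (fun o => if pvTruthy o then some (PySem.Str.strip (PySem.Str.lower (o.getD ""))) else none)
    let levels : List Nat := products.map (pvLevel terms)
    let best : Nat := levels.foldl max 0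
    if best = 0 then []
    else (products.zip levels).filterMap (fun pl => if pl.2 = best then some pl.1 else none)

-- ===== PRECONDITION & SPEC =====
def Spec_refine_products (products : List (List (String × String))) (dosage : Option String) (route : Option String) (form : Option String) (out : List (List (String × String))) : Prop := out = refine_products_alt products dosage route form
instance (products : List (List (String × String))) (dosage : Option String) (route : Option String) (form : Option String) (out : List (List (String × String))) : Decidable (Spec_refine_products products dosage route form out) := by unfold Spec_refine_products; infer_instance

-- ===== CLAIM (what is proved, stated in full; the proofs are below) =====
def Claim_equal_refine_products : Prop := ∀ (products : List (List (String × String))) (dosage : Option String) (route : Option String) (form : Option String), Dom_refine_products products dosage route form → Spec_refine_products products dosage route form (refine_products products dosage route form)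

-- ===== LEMMAS AND PROOFS =====

-- A's conditionally-appended search_terms list equals B's comprehension-built terms list
theorem terms_eq (dosage route form : Option String) :
    (if pvTruthy dosage then [PySem.Str.strip (PySem.Str.lower (dosage.getD ""))] else []) ++
      (if pvTruthy route then [PySem.Str.strip (PySem.Str.lower (route.getD ""))] else []) ++
      (if pvTruthy form then [PySem.Str.strip (PySem.Str.lower (form.getD ""))] else []) =
    [dosage, route, form].filterMap
      (fun o => if pvTruthy o then some (PySem.Str.strip (PySem.Str.lower (o.getD ""))) else none) := by
  simp only [List.filterMap_cons, List.filterMap_nil]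
  split_ifs <;> simp_all

-- A filterMap over ps zipped with its own map is a filter on ps
theorem zip_filterMap {β : Type} (ps : List (List (String × String)))
    (nm : List (String × String) → β) (cond : β → Prop) [DecidablePred cond] :
    (ps.zip (ps.map nm)).filterMap (fun pp => if cond pp.2 then some pp.1 else none) =
      ps.filter (fun p => decide (cond (nm p))) := by
  induction ps with
  | nil => rfl
  | cons p ps ih =>
    simp only [List.map_cons, List.zip_cons_cons, List.filterMap_cons, List.filter_cons]
    split_ifs <;> simp_all

theorem level_le_two (terms : List String) (p : List (String × String)) :
    pvLevel terms p ≤ 2 := by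
  unfold pvLevel; dsimp only; split_ifs <;> omega

theorem level_eq_two (terms : List String) (p : List (String × String)) :
    (pvLevel terms p = 2) ↔
      (terms.all (fun t => PySem.Str.isIn t (PySem.Str.lower (PySem.Dict.getD (PySem.Dict.mk p) "name" ""))) = true) := by
  unfold pvLevel; dsimp only; split_ifs <;> simp_all <;> tauto

theorem level_pos (terms : List String) (p : List (String × String)) :
    (1 ≤ pvLevel terms p) ↔
      (terms.all (fun t => PySem.Str.isIn t (PySem.Str.lower (PySem.Dict.getD (PySem.Dict.mk p) "name" ""))) = true
        ∨ terms.any (fun t => PySem.Str.isIn t (PySem.Str.lower (PySem.Dict.getD (PySem.Dict.mk p) "name" ""))) = true) := by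
  unfold pvLevel; dsimp only; split_ifs <;> simp_all <;> tauto

-- foldl max over a list: the result bounds every member
theorem foldl_max_le_iff (l : List Nat) (a c : Nat) :
    l.foldl max a ≤ c ↔ (a ≤ c ∧ ∀ x ∈ l, x ≤ c) := by
  induction l generalizing a with
  | nil => simp
  | cons x xs ih =>
    simp only [List.foldl_cons, ih, List.mem_cons]
    constructor
    · rintro ⟨h1, h2⟩
      exact ⟨le_trans (le_max_left a x) h1,
        fun y hy => hy.elim (fun e => e ▸ le_trans (le_max_right a x) h1) (h2 y)⟩
    · rintro ⟨h1, h2⟩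
      exact ⟨max_le h1 (h2 x (Or.inl rfl)), fun y hy => h2 y (Or.inr hy)⟩

theorem le_foldl_max (l : List Nat) (a x : Nat) (hx : x ∈ l) : x ≤ l.foldl max a := by
  induction l generalizing a with
  | nil => cases hx
  | cons y ys ih =>
    rcases List.mem_cons.mp hx with h | h
    · subst h
      exact le_trans (le_max_right a x) ((foldl_max_le_iff ys (max a x) _).mp le_rfl).1
    · exact ih _ h

-- the core of both functions after the shared guard, over the shared term list
theorem core (terms : List String) (ps : List (List (String × String))) :
    (let product_names : List String :=
       ps.map (fun p => PySem.Str.lower (PySem.Dict.getD (PySem.Dict.mk p) "name" ""));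
     let exact_matches : List (List (String × String)) :=
       (ps.zip product_names).filterMap
         (fun pp => if terms.all (fun t => PySem.Str.isIn t pp.2) then some pp.1 else none);
     if exact_matches ≠ [] then exact_matches
     else
       let partial_matches : List (List (String × String)) :=
         (ps.zip product_names).filterMap
           (fun pp => if terms.any (fun t => PySem.Str.isIn t pp.2) then some pp.1 else none);
       if partial_matches ≠ [] then partial_matches else []) =
    (let levels : List Nat := ps.map (pvLevel terms);
     let best : Nat := levels.foldl max 0;
     if best = 0 then []
     else (ps.zip levels).filterMap (fun pl => if pl.2 = best then some pl.1 else none)) := by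
  simp only []
  rw [zip_filterMap ps (fun p => PySem.Str.lower (PySem.Dict.getD (PySem.Dict.mk p) "name" ""))
        (fun x => terms.all (fun t => PySem.Str.isIn t x) = true),
      zip_filterMap ps (fun p => PySem.Str.lower (PySem.Dict.getD (PySem.Dict.mk p) "name" ""))
        (fun x => terms.any (fun t => PySem.Str.isIn t x) = true),
      zip_filterMap ps (pvLevel terms) (fun l => l = (ps.map (pvLevel terms)).foldl max 0)]
  simp only [Bool.decide_eq_true]
  set best := (ps.map (pvLevel terms)).foldl max 0 with hbest
  by_cases hex : ∃ p ∈ ps, pvLevel terms p = 2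
  · -- some exact match: best = 2, both sides are the level-2 filter
    obtain ⟨p0, hp0, hl0⟩ := hex
    have hb2 : best = 2 := by
      have h1 : (2 : Nat) ≤ best := hl0 ▸ le_foldl_max _ 0 _ (List.mem_map_of_mem hp0)
      have h2 : best ≤ 2 := (foldl_max_le_iff _ 0 2).mpr
        ⟨by omega, fun x hx => by
          obtain ⟨q, _, rfl⟩ := List.mem_map.mp hx; exact level_le_two terms q⟩
      omega
    have hne : ps.filter (fun p => terms.all (fun t => PySem.Str.isIn t (PySem.Str.lower (PySem.Dict.getD (PySem.Dict.mk p) "name" "")))) ≠ [] := by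
      intro h
      exact absurd ((level_eq_two terms p0).mp hl0)
        (by simpa using (List.filter_eq_nil_iff.mp h) p0 hp0)
    rw [if_pos hne, if_neg (by omega : ¬ best = 0)]
    exact List.filter_congr fun p _ => by
      rw [Bool.eq_iff_iff, hb2, decide_eq_true_eq]
      exact ((level_eq_two terms p).symm)
  · -- no exact match: A's exact filter is empty
    push Not at hex
    have hall : ∀ p ∈ ps,
        ¬ (terms.all (fun t => PySem.Str.isIn t (PySem.Str.lower (PySem.Dict.getD (PySem.Dict.mk p) "name" ""))) = true) := by
      intro p hp h
      exact hex p hp ((level_eq_two terms p).mpr h)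
    have hexnil : ps.filter (fun p => terms.all (fun t => PySem.Str.isIn t (PySem.Str.lower (PySem.Dict.getD (PySem.Dict.mk p) "name" "")))) = [] :=
      List.filter_eq_nil_iff.mpr (by simpa using hall)
    rw [if_neg (by simpa using hexnil)]
    have hb2 : best ≤ 1 := (foldl_max_le_iff _ 0 1).mpr
      ⟨by omega, fun x hx => by
        obtain ⟨q, hq, rfl⟩ := List.mem_map.mp hx
        have := level_le_two terms q
        have h2 := hex q hq
        omega⟩
    -- on ps, any-match coincides with level = 1 (level 2 excluded)
    have hany_level : ∀ p ∈ ps,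
        (terms.any (fun t => PySem.Str.isIn t (PySem.Str.lower (PySem.Dict.getD (PySem.Dict.mk p) "name" ""))) = true)
          ↔ pvLevel terms p = 1 := by
      intro p hp
      constructor
      · intro h
        have := (level_pos terms p).mpr (Or.inr h)
        have := level_le_two terms p
        have := hex p hp
        omega
      · intro h
        rcases (level_pos terms p).mp (by omega) with hA | hB
        · exact absurd ((level_eq_two terms p).mpr hA) (hex p hp)
        · exact hB
    by_cases hpar : ∃ p ∈ ps, pvLevel terms p = 1
    · obtain ⟨p1, hp1, hl1⟩ := hpar
      have hb1 : best = 1 := by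
        have h1 : (1 : Nat) ≤ best := hl1 ▸ le_foldl_max _ 0 _ (List.mem_map_of_mem hp1)
        omega
      have hne : ps.filter (fun p => terms.any (fun t => PySem.Str.isIn t (PySem.Str.lower (PySem.Dict.getD (PySem.Dict.mk p) "name" "")))) ≠ [] := by
        intro h
        exact absurd ((hany_level p1 hp1).mpr hl1)
          (by simpa using (List.filter_eq_nil_iff.mp h) p1 hp1)
      rw [if_pos hne, if_neg (by omega : ¬ best = 0)]
      exact List.filter_congr fun p hp => by
        rw [Bool.eq_iff_iff, hb1, decide_eq_true_eq]
        exact hany_level p hp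
    · push Not at hpar
      have hb0 : best = 0 := by
        have : best ≤ 0 := (foldl_max_le_iff _ 0 0).mpr
          ⟨le_rfl, fun x hx => by
            obtain ⟨q, hq, rfl⟩ := List.mem_map.mp hx
            have := level_le_two terms q
            have h2 := hex q hq
            have h1 := hpar q hq
            omega⟩
        omega
      have hparnil : ps.filter (fun p => terms.any (fun t => PySem.Str.isIn t (PySem.Str.lower (PySem.Dict.getD (PySem.Dict.mk p) "name" "")))) = [] :=
        List.filter_eq_nil_iff.mpr (by
          intro p hp h
          exact hpar p hp ((hany_level p hp).mp h))
      rw [if_neg (by simpa using hparnil), if_pos hb0]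

-- ===== VERDICT (by name: the statement is the Claim_ definition above) =====
theorem refine_products_spec : Claim_equal_refine_products := by
  intro products dosage route form _
  unfold Spec_refine_products refine_products refine_products_alt
  by_cases hg : products = [] ∨ ¬(pvTruthy dosage ∨ pvTruthy route ∨ pvTruthy form)
  · rw [if_pos hg, if_pos hg]
  · rw [if_neg hg, if_neg hg, terms_eq dosage route form]
    exact core _ products
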